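-- pv_equiv track=rewrite | github.com/lehancode/uba_computacion | parciales/Python - ComC-20240715/solucion.py | racha_mas_larga
-- ===== SOURCE A (Python) =====
-- def racha_mas_larga (tiempos: list[int])-> tuple[int, int]:
--   inicio: int = 0
--   inicio_actual = 0
--   final: int = 0
--   racha: int = 0
--   racha_actual: int = 0
--
--   for i in range(len(tiempos)):
--     if tiempos[i] == 0 or tiempos[i] == 61:
--       if racha_actual > racha:
--         final = i - 1
--         inicio = inicio_actual
--         racha = racha_actual
--       inicio_actual = i + 1
--       racha_actual = 0
--     else:
--       racha_actual += 1
--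
--   if racha_actual > racha:
--     final = i
--     inicio = inicio_actual
--
--   return (inicio, final)
-- ===== SOURCE B (Python) =====
-- def racha_mas_larga(tiempos: list[int]) -> tuple[int, int]:
--     # Phase 1: collect maximal runs of values != 0 and != 61 as (start, end) inclusive.
--     runs = []
--     start = None
--     for i, t in enumerate(tiempos):
--         if t == 0 or t == 61:
--             if start is not None:
--                 runs.append((start, i - 1))
--                 start = None
--         elif start is None:
--             start = i
--     if start is not None:
--         runs.append((start, len(tiempos) - 1))
--     # Phase 2: pick the first longest run (max is stable: first maximum wins).
--     if not runs:
--         return (0, 0)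
--     return max(runs, key=lambda r: r[1] - r[0] + 1)
-- ===== Notes on version B (the rewrite author's own statement) =====
-- stated objective: simpler
-- what changed: Replaces A's inline running-best bookkeeping (five mutable counters with a post-loop fixup) by a two-phase computation: first materialize all maximal non-separator runs as (start,end) pairs, then pick the first longest with a stable max.
import Mathlib
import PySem

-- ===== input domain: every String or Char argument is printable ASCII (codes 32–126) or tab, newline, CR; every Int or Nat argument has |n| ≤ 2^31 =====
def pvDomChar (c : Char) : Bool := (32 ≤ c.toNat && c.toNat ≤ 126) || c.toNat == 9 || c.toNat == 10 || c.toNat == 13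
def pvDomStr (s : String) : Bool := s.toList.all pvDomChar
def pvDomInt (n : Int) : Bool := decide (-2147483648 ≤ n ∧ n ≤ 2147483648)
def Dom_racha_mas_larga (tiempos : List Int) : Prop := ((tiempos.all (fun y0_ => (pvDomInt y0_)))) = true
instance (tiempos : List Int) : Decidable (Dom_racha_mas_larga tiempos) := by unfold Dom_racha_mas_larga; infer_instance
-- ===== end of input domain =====

-- B replaces A's inline running-best bookkeeping by a two-phase computation (materialize all
-- maximal non-separator runs, then pick the first longest): simpler decomposition, same O(n) cost.


-- ===== PORT A =====
-- A's loop over range(len(tiempos)) is transcribed as recursion over the list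
-- carrying the index i and the five loop variables (inicio, inicio_actual, final, racha, racha_actual).
def pvLoopA : List Int → Int → Int × Int × Int × Int × Int → Int × Int × Int × Int × Int
  | [], _, s => s
  | t :: rest, i, (inicio, ia, final, racha, ra) =>
    if t = 0 ∨ t = 61 then
      if ra > racha then pvLoopA rest (i + 1) (ia, i + 1, i - 1, ra, 0)
      else pvLoopA rest (i + 1) (inicio, i + 1, final, racha, 0)
    else pvLoopA rest (i + 1) (inicio, ia, final, racha, ra + 1)

def racha_mas_larga (tiempos : List Int) : Int × Int :=
  let (inicio, ia, final, racha, ra) := pvLoopA tiempos 0 (0, 0, 0, 0, 0)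
  -- the trailing 'if racha_actual > racha' with i = len(tiempos) - 1
  if ra > racha then (ia, (tiempos.length : Int) - 1) else (inicio, final)

-- ===== PORT B =====
-- Phase 1 of Source B: collect maximal non-separator runs as inclusive (start, end) pairs.
def pvRunsLoop : List Int → Int → List (Int × Int) → Option Int → List (Int × Int) × Option Int
  | [], _, runs, start => (runs, start)
  | t :: rest, i, runs, start =>
    if t = 0 ∨ t = 61 then
      match start with
      | some s => pvRunsLoop rest (i + 1) (runs ++ [(s, i - 1)]) none
      | none => pvRunsLoop rest (i + 1) runs none
    else
      match start with
      | none => pvRunsLoop rest (i + 1) runs (some i)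
      | some _ => pvRunsLoop rest (i + 1) runs start

def pvRuns (tiempos : List Int) : List (Int × Int) :=
  let (runs, start) := pvRunsLoop tiempos 0 [] none
  match start with
  | some s => runs ++ [(s, (tiempos.length : Int) - 1)]
  | none => runs

def pvLenR (r : Int × Int) : Int := r.2 - r.1 + 1

-- Phase 2 of Source B: Python's stable max over the runs (first maximum wins).
def racha_mas_larga_alt (tiempos : List Int) : Int × Int :=
  match pvRuns tiempos with
  | [] => (0, 0)
  | r :: rs => rs.foldl (fun best r2 => if pvLenR r2 > pvLenR best then r2 else best) r

-- ===== PRECONDITION & SPEC =====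
def Spec_racha_mas_larga (tiempos : List Int) (out : Int × Int) : Prop := out = racha_mas_larga_alt tiempos
instance (tiempos : List Int) (out : Int × Int) : Decidable (Spec_racha_mas_larga tiempos out) := by unfold Spec_racha_mas_larga; infer_instance

-- ===== CLAIM (what is proved, stated in full; the proofs are below) =====
def Claim_equal_racha_mas_larga : Prop := ∀ (tiempos : List Int), Dom_racha_mas_larga tiempos → Spec_racha_mas_larga tiempos (racha_mas_larga tiempos)

-- ===== LEMMAS AND PROOFS =====


def pvBest (b : Int × Int) (l : List (Int × Int)) : Int × Int :=
  l.foldl (fun best r2 => if pvLenR r2 > pvLenR best then r2 else best) b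

-- the coupling invariant between A's five loop variables and B's (runs, start) state at index i
def pvRel (i inicio ia final racha ra : Int) (runs : List (Int × Int)) (start : Option Int) : Prop :=
  (match start with
   | none => ra = 0 ∧ ia = i
   | some s => ia = s ∧ ra = i - s ∧ 1 ≤ ra)
  ∧
  (match runs with
   | [] => inicio = 0 ∧ final = 0 ∧ racha = 0
   | r :: rs => pvBest r rs = (inicio, final) ∧ racha = final - inicio + 1 ∧ 1 ≤ racha)

def pvRelP (i : Int) (sA : Int × Int × Int × Int × Int)
    (sB : List (Int × Int) × Option Int) : Prop :=
  pvRel i sA.1 sA.2.1 sA.2.2.1 sA.2.2.2.1 sA.2.2.2.2 sB.1 sB.2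

lemma pvBest_append (b : Int × Int) (l : List (Int × Int)) (r : Int × Int) :
    pvBest b (l ++ [r]) = if pvLenR r > pvLenR (pvBest b l) then r else pvBest b l := by
  simp [pvBest, List.foldl_append]

lemma pvLoop_rel : ∀ (l : List Int) (i inicio ia final racha ra : Int)
    (runs : List (Int × Int)) (start : Option Int),
    pvRel i inicio ia final racha ra runs start →
    pvRelP (i + l.length) (pvLoopA l i (inicio, ia, final, racha, ra))
      (pvRunsLoop l i runs start) := by
  intro l
  induction l with
  | nil =>
    intro i inicio ia final racha ra runs start h
    simpa [pvLoopA, pvRunsLoop, pvRelP] using h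
  | cons t rest ih =>
    intro i inicio ia final racha ra runs start h
    have hidx : i + ((t :: rest).length : Int) = (i + 1) + (rest.length : Int) := by
      simp [List.length_cons]; ring
    rw [hidx]
    obtain ⟨h1, h2⟩ := h
    by_cases hsep : (t = 0 ∨ t = 61)
    · cases start with
      | none =>
        obtain ⟨hra, hia⟩ := h1
        have hracha : 0 ≤ racha := by
          cases runs with
          | nil => obtain ⟨-, -, h3⟩ := h2; omega
          | cons r rs => obtain ⟨-, -, h3⟩ := h2; omega
        have hnot : ¬ ra > racha := by omega
        simp only [pvLoopA, pvRunsLoop, hsep, if_pos, if_neg hnot]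
        exact ih (i + 1) inicio (i + 1) final racha 0 runs none ⟨⟨rfl, rfl⟩, h2⟩
      | some s =>
        obtain ⟨hia, hra, hra1⟩ := h1
        cases runs with
        | nil =>
          obtain ⟨-, -, h3⟩ := h2
          have hgt : ra > racha := by omega
          simp only [pvLoopA, pvRunsLoop, hsep, if_pos, if_pos hgt, List.nil_append]
          refine ih (i + 1) ia (i + 1) (i - 1) ra 0 [(s, i - 1)] none ⟨⟨rfl, rfl⟩, ?_⟩
          refine ⟨?_, by omega, hra1⟩
          simp [pvBest, hia]
        | cons r rs =>
          obtain ⟨h3, h4, h5⟩ := h2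
          have hlen : pvLenR (pvBest r rs) = racha := by rw [h3]; simp [pvLenR]; omega
          have hlen2 : pvLenR (s, i - 1) = ra := by simp [pvLenR]; omega
          by_cases hgt : ra > racha
          · simp only [pvLoopA, pvRunsLoop, hsep, if_pos, if_pos hgt]
            refine ih (i + 1) ia (i + 1) (i - 1) ra 0 (r :: rs ++ [(s, i - 1)]) none
              ⟨⟨rfl, rfl⟩, ?_⟩
            refine ⟨?_, by omega, hra1⟩
            rw [List.append_eq, pvBest_append, hlen, hlen2, if_pos hgt, hia]
          · simp only [pvLoopA, pvRunsLoop, hsep, if_pos, if_neg hgt]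
            refine ih (i + 1) inicio (i + 1) final racha 0 (r :: rs ++ [(s, i - 1)]) none
              ⟨⟨rfl, rfl⟩, ?_⟩
            refine ⟨?_, h4, h5⟩
            rw [List.append_eq, pvBest_append, hlen, hlen2, if_neg hgt, h3]
    · cases start with
      | none =>
        obtain ⟨hra, hia⟩ := h1
        simp only [pvLoopA, pvRunsLoop, hsep]
        exact ih (i + 1) inicio ia final racha (ra + 1) runs (some i)
          ⟨⟨hia, by omega, by omega⟩, h2⟩
      | some s =>
        obtain ⟨hia, hra, hra1⟩ := h1
        simp only [pvLoopA, pvRunsLoop, hsep]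
        exact ih (i + 1) inicio ia final racha (ra + 1) runs (some s)
          ⟨⟨hia, by omega, by omega⟩, h2⟩

-- ===== VERDICT (by name: the statement is the Claim_ definition above) =====
theorem racha_mas_larga_spec : Claim_equal_racha_mas_larga := by
  intro tiempos _
  unfold Spec_racha_mas_larga
  rcases hA : pvLoopA tiempos 0 (0, 0, 0, 0, 0) with ⟨inicio, ia, final, racha, ra⟩
  rcases hB : pvRunsLoop tiempos 0 [] none with ⟨runs, start⟩
  have h := pvLoop_rel tiempos 0 0 0 0 0 0 [] none ⟨⟨rfl, rfl⟩, ⟨rfl, rfl, rfl⟩⟩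
  rw [hA, hB] at h
  have hzero : (0 : Int) + (tiempos.length : Int) = (tiempos.length : Int) := by omega
  rw [hzero] at h
  dsimp only [pvRelP] at h
  obtain ⟨h1, h2⟩ := h
  simp only [racha_mas_larga, racha_mas_larga_alt, pvRuns, hA, hB]
  cases start with
  | none =>
    obtain ⟨hra, -⟩ := h1
    cases runs with
    | nil =>
      obtain ⟨hi, hf, hr⟩ := h2
      simp [hra, hr, hi, hf]
    | cons r rs =>
      obtain ⟨h3, h4, h5⟩ := h2
      rw [if_neg (by omega)]
      simpa [pvBest] using h3.symm
  | some s =>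
    obtain ⟨hia, hra, hra1⟩ := h1
    cases runs with
    | nil =>
      obtain ⟨-, -, hr⟩ := h2
      rw [if_pos (by omega)]
      simp [hia]
    | cons r rs =>
      obtain ⟨h3, h4, h5⟩ := h2
      have hlen : pvLenR (pvBest r rs) = racha := by rw [h3]; simp [pvLenR]; omega
      have hlen2 : pvLenR (s, (tiempos.length : Int) - 1) = ra := by simp [pvLenR]; omega
      have := pvBest_append r rs (s, (tiempos.length : Int) - 1)
      rw [hlen, hlen2, h3] at this
      simp only [List.cons_append]
      by_cases hgt : ra > racha
      · rw [if_pos hgt]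
        rw [if_pos hgt] at this
        simpa [pvBest, hia] using this.symm
      · rw [if_neg hgt]
        rw [if_neg hgt] at this
        simpa [pvBest] using this.symm
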